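-- pv_equiv track=rewrite | github.com/Carol-zz/dual_noise_encryption | decoding/MSAinfer-decryption.py | pretty_print_align
-- ===== SOURCE A (Python) =====
-- def pretty_print_align(seq1, seq2, path_code):
--     align1 = ''
--     middle = ''
--     align2 = ''
--     for p in path_code:
--         if p == '0':
--             align1 += seq1[0]
--             align2 += seq2[0]
--             middle += '|' if seq1[0] == seq2[0] else ' '
--             seq1 = seq1[1:]
--             seq2 = seq2[1:]
--         elif p == '1':
--             align1 += '-'
--             align2 += seq2[0]
--             middle += ' '
--             seq2 = seq2[1:]
--         elif p == '2':
--             align1 += seq1[0]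
--             align2 += '-'
--             middle += ' '
--             seq1 = seq1[1:]
--     return (align1, align2)
-- ===== SOURCE B (Python) =====
-- def pretty_print_align(seq1, seq2, path_code):
--     out1 = []
--     i = 0
--     for p in path_code:
--         if p == '0' or p == '2':
--             out1.append(seq1[i])
--             i += 1
--         elif p == '1':
--             out1.append('-')
--     out2 = []
--     j = 0
--     for p in path_code:
--         if p == '0' or p == '1':
--             out2.append(seq2[j])
--             j += 1
--         elif p == '2':
--             out2.append('-')
--     return (''.join(out1), ''.join(out2))
-- ===== Notes on version B (the rewrite author's own statement) =====
-- stated objective: simpler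
-- what changed: Two independent index-based passes over path_code (one per output string), appending to lists joined once, instead of one interleaved loop that repeatedly reslices both sequences and builds an unused middle string.
import Mathlib
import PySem

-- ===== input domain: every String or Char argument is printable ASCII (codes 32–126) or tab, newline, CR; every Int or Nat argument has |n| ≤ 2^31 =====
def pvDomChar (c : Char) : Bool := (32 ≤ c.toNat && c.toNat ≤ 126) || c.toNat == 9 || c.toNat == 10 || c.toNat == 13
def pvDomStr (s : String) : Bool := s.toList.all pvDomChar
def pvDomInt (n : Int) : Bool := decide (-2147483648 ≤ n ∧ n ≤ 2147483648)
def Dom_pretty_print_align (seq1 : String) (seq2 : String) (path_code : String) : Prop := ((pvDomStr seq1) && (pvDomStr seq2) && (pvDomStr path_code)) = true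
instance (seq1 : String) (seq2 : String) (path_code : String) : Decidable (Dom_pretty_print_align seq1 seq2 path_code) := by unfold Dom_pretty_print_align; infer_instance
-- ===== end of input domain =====

-- B rebuilds align1 and align2 in two independent index-based passes over path_code (simpler; no middle string);
-- equivalence is over the return value only.

-- ===== PORT A =====
-- One interleaved loop, consuming seq1/seq2 from the front; `none` marks the IndexError of seq1[0]/seq2[0]
-- on exhausted input (excluded by Pre_).
def pvALoop (ps : List Char) (l1 l2 a1 mid a2 : List Char) : Option (List Char × List Char) :=
  match ps with
  | [] => some (a1, a2)
  | p :: rest =>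
    if p = '0' then
      match l1, l2 with
      | c1 :: t1, c2 :: t2 =>
          pvALoop rest t1 t2 (a1 ++ [c1]) (mid ++ [if c1 = c2 then '|' else ' ']) (a2 ++ [c2])
      | _, _ => none
    else if p = '1' then
      match l2 with
      | c2 :: t2 => pvALoop rest l1 t2 (a1 ++ ['-']) (mid ++ [' ']) (a2 ++ [c2])
      | _ => none
    else if p = '2' then
      match l1 with
      | c1 :: t1 => pvALoop rest t1 l2 (a1 ++ [c1]) (mid ++ [' ']) (a2 ++ ['-'])
      | _ => none
    else pvALoop rest l1 l2 a1 mid a2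

def pretty_print_align (seq1 : String) (seq2 : String) (path_code : String) : String × String :=
  match pvALoop path_code.toList seq1.toList seq2.toList [] [] [] with
  | some (a1, a2) => (String.mk a1, String.mk a2)
  | none => ("", "")

-- ===== PORT B =====
-- pass 1: index i into seq1, consume on '0'/'2', gap on '1'.  seq1[i] out of range would be an
-- IndexError in Python (excluded by Pre_); the port returns '?' there.
def pvAltPass1 (ps : List Char) (s : List Char) (i : Nat) : List Char :=
  match ps with
  | [] => []
  | p :: rest =>
    if p = '0' ∨ p = '2' then s.getD i '?' :: pvAltPass1 rest s (i + 1)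
    else if p = '1' then '-' :: pvAltPass1 rest s i
    else pvAltPass1 rest s i

-- pass 2: index j into seq2, consume on '0'/'1', gap on '2'.
def pvAltPass2 (ps : List Char) (s : List Char) (j : Nat) : List Char :=
  match ps with
  | [] => []
  | p :: rest =>
    if p = '0' ∨ p = '1' then s.getD j '?' :: pvAltPass2 rest s (j + 1)
    else if p = '2' then '-' :: pvAltPass2 rest s j
    else pvAltPass2 rest s j

def pretty_print_align_alt (seq1 : String) (seq2 : String) (path_code : String) : String × String :=
  (String.mk (pvAltPass1 path_code.toList seq1.toList 0),
   String.mk (pvAltPass2 path_code.toList seq2.toList 0))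

-- ===== PRECONDITION & SPEC =====
-- Pre_ excludes exactly the inputs where Python A raises IndexError: path_code demands more
-- characters from seq1 (codes '0'/'2') or seq2 (codes '0'/'1') than the sequence has.
def Pre_pretty_print_align (seq1 : String) (seq2 : String) (path_code : String) : Prop :=
  path_code.toList.count '0' + path_code.toList.count '2' ≤ seq1.toList.length ∧
  path_code.toList.count '0' + path_code.toList.count '1' ≤ seq2.toList.length
instance (seq1 : String) (seq2 : String) (path_code : String) : Decidable (Pre_pretty_print_align seq1 seq2 path_code) := by unfold Pre_pretty_print_align; infer_instance

def pvWitness_pretty_print_align : String × String × String := ("ACGT", "AGT", "0201")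

def Spec_pretty_print_align (seq1 : String) (seq2 : String) (path_code : String) (out : String × String) : Prop := out = pretty_print_align_alt seq1 seq2 path_code
instance (seq1 : String) (seq2 : String) (path_code : String) (out : String × String) : Decidable (Spec_pretty_print_align seq1 seq2 path_code out) := by unfold Spec_pretty_print_align; infer_instance

-- ===== CLAIM (what is proved, stated in full; the proofs are below) =====
def Claim_equal_pretty_print_align : Prop := ∀ (seq1 : String) (seq2 : String) (path_code : String), Dom_pretty_print_align seq1 seq2 path_code → Pre_pretty_print_align seq1 seq2 path_code → Spec_pretty_print_align seq1 seq2 path_code (pretty_print_align seq1 seq2 path_code)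

-- ===== LEMMAS AND PROOFS =====

theorem pvAltPass1_shift (ps : List Char) (c : Char) (t : List Char) (i : Nat) :
    pvAltPass1 ps (c :: t) (i + 1) = pvAltPass1 ps t i := by
  induction ps generalizing i with
  | nil => rfl
  | cons p rest ih =>
    simp only [pvAltPass1]
    split_ifs <;> simp [ih]

theorem pvAltPass2_shift (ps : List Char) (c : Char) (t : List Char) (j : Nat) :
    pvAltPass2 ps (c :: t) (j + 1) = pvAltPass2 ps t j := by
  induction ps generalizing j with
  | nil => rfl
  | cons p rest ih =>
    simp only [pvAltPass2]
    split_ifs <;> simp [ih]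

theorem pvALoop_cons0 (rest : List Char) (c1 c2 : Char) (t1 t2 a1 mid a2 : List Char) :
    pvALoop ('0' :: rest) (c1 :: t1) (c2 :: t2) a1 mid a2 =
      pvALoop rest t1 t2 (a1 ++ [c1]) (mid ++ [if c1 = c2 then '|' else ' ']) (a2 ++ [c2]) := rfl

theorem pvALoop_cons1 (rest : List Char) (l1 : List Char) (c2 : Char) (t2 a1 mid a2 : List Char) :
    pvALoop ('1' :: rest) l1 (c2 :: t2) a1 mid a2 =
      pvALoop rest l1 t2 (a1 ++ ['-']) (mid ++ [' ']) (a2 ++ [c2]) := rfl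

theorem pvALoop_cons2 (rest : List Char) (c1 : Char) (t1 l2 a1 mid a2 : List Char) :
    pvALoop ('2' :: rest) (c1 :: t1) l2 a1 mid a2 =
      pvALoop rest t1 l2 (a1 ++ [c1]) (mid ++ [' ']) (a2 ++ ['-']) := rfl

theorem pvALoop_cons_other (p : Char) (rest l1 l2 a1 mid a2 : List Char)
    (hp0 : ¬ p = '0') (hp1 : ¬ p = '1') (hp2 : ¬ p = '2') :
    pvALoop (p :: rest) l1 l2 a1 mid a2 = pvALoop rest l1 l2 a1 mid a2 := by
  simp only [pvALoop, if_neg hp0, if_neg hp1, if_neg hp2]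

theorem pvALoop_eq (ps : List Char) :
    ∀ (l1 l2 a1 mid a2 : List Char),
      ps.count '0' + ps.count '2' ≤ l1.length →
      ps.count '0' + ps.count '1' ≤ l2.length →
      pvALoop ps l1 l2 a1 mid a2 =
        some (a1 ++ pvAltPass1 ps l1 0, a2 ++ pvAltPass2 ps l2 0) := by
  induction ps with
  | nil => intro l1 l2 a1 mid a2 _ _; simp [pvALoop, pvAltPass1, pvAltPass2]
  | cons p rest ih =>
    intro l1 l2 a1 mid a2 h1 h2
    simp only [List.count_cons] at h1 h2
    by_cases hp0 : p = '0'
    · subst hp0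
      obtain ⟨c1, t1, rfl⟩ : ∃ c t, l1 = c :: t := by
        cases l1 with
        | nil => simp at h1 <;> omega
        | cons c t => exact ⟨c, t, rfl⟩
      obtain ⟨c2, t2, rfl⟩ : ∃ c t, l2 = c :: t := by
        cases l2 with
        | nil => simp at h2 <;> omega
        | cons c t => exact ⟨c, t, rfl⟩
      simp only [List.length_cons] at h1 h2
      have e1 : rest.count '0' + rest.count '2' ≤ t1.length := by simp at h1 <;> omega
      have e2 : rest.count '0' + rest.count '1' ≤ t2.length := by simp at h2 <;> omega
      rw [pvALoop_cons0, ih t1 t2 _ _ _ e1 e2]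
      simp [pvAltPass1, pvAltPass2, pvAltPass1_shift, pvAltPass2_shift,
            List.append_assoc]
    · by_cases hp1 : p = '1'
      · subst hp1
        obtain ⟨c2, t2, rfl⟩ : ∃ c t, l2 = c :: t := by
          cases l2 with
          | nil => simp at h2 <;> omega
          | cons c t => exact ⟨c, t, rfl⟩
        simp only [List.length_cons] at h2
        have e1 : rest.count '0' + rest.count '2' ≤ l1.length := by simp at h1 <;> omega
        have e2 : rest.count '0' + rest.count '1' ≤ t2.length := by simp at h2 <;> omega
        rw [pvALoop_cons1, ih l1 t2 _ _ _ e1 e2]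
        simp [pvAltPass1, pvAltPass2, pvAltPass2_shift, List.append_assoc]
      · by_cases hp2 : p = '2'
        · subst hp2
          obtain ⟨c1, t1, rfl⟩ : ∃ c t, l1 = c :: t := by
            cases l1 with
            | nil => simp at h1 <;> omega
            | cons c t => exact ⟨c, t, rfl⟩
          simp only [List.length_cons] at h1
          have e1 : rest.count '0' + rest.count '2' ≤ t1.length := by simp at h1 <;> omega
          have e2 : rest.count '0' + rest.count '1' ≤ l2.length := by simp at h2 <;> omega
          rw [pvALoop_cons2, ih t1 l2 _ _ _ e1 e2]
          simp [pvAltPass1, pvAltPass2, pvAltPass1_shift, List.append_assoc]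
        · have e1 : rest.count '0' + rest.count '2' ≤ l1.length := by
            simp [hp0, hp2] at h1 <;> omega
          have e2 : rest.count '0' + rest.count '1' ≤ l2.length := by
            simp [hp0, hp1] at h2 <;> omega
          rw [pvALoop_cons_other p rest l1 l2 a1 mid a2 hp0 hp1 hp2,
              ih l1 l2 _ _ _ e1 e2]
          simp [pvAltPass1, pvAltPass2, hp0, hp1, hp2]

-- ===== VERDICT (by name: the statement is the Claim_ definition above) =====
theorem pretty_print_align_spec : Claim_equal_pretty_print_align := by
  intro seq1 seq2 path_code _hdom hpre
  obtain ⟨h1, h2⟩ := hpre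
  unfold Spec_pretty_print_align pretty_print_align pretty_print_align_alt
  rw [pvALoop_eq path_code.toList seq1.toList seq2.toList [] [] [] h1 h2]
  simp
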